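-- pv_equiv track=rewrite | github.com/MallorySilverMiller/Fall-Coding-Class-2018 | HW6.py | count
-- ===== SOURCE A (Python) =====
-- def count(x):
--     num_dict = {}  # ex: {"h": 1, "e": 1, "l": 2, "o": 1} {"character": num of times}
--     num_said = {}  # to prevent saying the same thing twice
--     to_return = ""
--     for c in x:  # for counting characters
--         try:
--             num_dict.update({c: (num_dict[c] + 1)})
--         except KeyError:
--             num_dict.update({c: 1})
--     for c in x:  # for proper output
--         if c == x[0]:
--             if num_dict[c] > 1 and c not in num_said:
--                 to_return = "\"{0}\" has {1} \"{2}\"s".format(x, num_dict[x[0]], x[0])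
--                 try:
--                     num_said.update({c: (num_said[c] + 1)})
--                 except KeyError:
--                     num_said.update({c: 1})
--
--             elif num_dict[c] <= 1:
--                 to_return = "\"{0}\" has {1} \"{2}\"".format(x, num_dict[x[0]], x[0])
--             else:
--                 pass
--         else:
--             if num_dict[c] > 1 and c not in num_said:
--                 to_return += ", {1} \"{0}\"s".format(c, num_dict[c])
--                 try:
--                     num_said.update({c: (num_said[c] + 1)})
--                 except KeyError:
--                     num_said.update({c: 1})
--             elif num_dict[c] <= 1:
--                 to_return += ", {1} \"{0}\"".format(c, num_dict[c])
--             else: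
--                 pass
--     return to_return
-- ===== SOURCE B (Python) =====
-- def count(x):
--     if not x:
--         return ""
--     counts = {}
--     for c in x:
--         counts[c] = counts.get(c, 0) + 1
--     parts = []
--     for c, n in counts.items():
--         s = "s" if n > 1 else ""
--         if c == x[0]:
--             parts.append('"{0}" has {1} "{2}"{3}'.format(x, n, c, s))
--         else:
--             parts.append(', {0} "{1}"{2}'.format(n, c, s))
--     return "".join(parts)
-- ===== Notes on version B (the rewrite author's own statement) =====
-- stated objective: simpler
-- what changed: B drops A's second full scan of the input with its num_said dedup dict and instead iterates once over the counter dict's items (insertion order = first-appearance order), emitting the header for the first character and one fragment per remaining distinct character; the output loop runs over k distinct characters instead of n input characters.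
import Mathlib
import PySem

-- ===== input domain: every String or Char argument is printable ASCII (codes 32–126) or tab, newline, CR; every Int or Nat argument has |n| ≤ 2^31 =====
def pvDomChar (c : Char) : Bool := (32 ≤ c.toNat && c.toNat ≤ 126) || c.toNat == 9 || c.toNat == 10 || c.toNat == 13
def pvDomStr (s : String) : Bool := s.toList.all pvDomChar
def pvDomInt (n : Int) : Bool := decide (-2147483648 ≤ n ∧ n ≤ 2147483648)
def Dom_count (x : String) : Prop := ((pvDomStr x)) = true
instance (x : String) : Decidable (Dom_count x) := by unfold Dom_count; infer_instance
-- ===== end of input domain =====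

-- B replaces A's second scan over the whole input (with a dedup dict) by one pass over the
-- counter dict's items in insertion (= first-appearance) order; objective: simpler.


-- ===== PORT A =====
-- try: d[c] = d[c] + 1 / except KeyError: d[c] = 1
def pvBump (d : PySem.Dict Char Int) (c : Char) : PySem.Dict Char Int :=
  match d.get? c with
  | some v => d.insert c (v + 1)
  | none   => d.insert c 1

-- the body of A's second loop; h0 is x[0] (only evaluated when x is nonempty, so headD is exact
-- there), and num_dict[c] is getD c 0 (exact: every c of the loop is a key of num_dict)
def pvStepA (cs : List Char) (d : PySem.Dict Char Int) (h0 : Char)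
    (st : PySem.Dict Char Int × List Char) (c : Char) : PySem.Dict Char Int × List Char :=
  if c = h0 then
    if 1 < d.getD c 0 ∧ st.1.contains c = false then
      (pvBump st.1 c,
        ['"'] ++ cs ++ "\" has ".toList ++ PySem.Int.toChars (d.getD h0 0) ++ " \"".toList ++ [h0] ++ "\"s".toList)
    else if d.getD c 0 ≤ 1 then
      (st.1,
        ['"'] ++ cs ++ "\" has ".toList ++ PySem.Int.toChars (d.getD h0 0) ++ " \"".toList ++ [h0] ++ "\"".toList)
    else st
  else
    if 1 < d.getD c 0 ∧ st.1.contains c = false then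
      (pvBump st.1 c,
        st.2 ++ ", ".toList ++ PySem.Int.toChars (d.getD c 0) ++ " \"".toList ++ [c] ++ "\"s".toList)
    else if d.getD c 0 ≤ 1 then
      (st.1,
        st.2 ++ ", ".toList ++ PySem.Int.toChars (d.getD c 0) ++ " \"".toList ++ [c] ++ "\"".toList)
    else st

def count (x : String) : String :=
  let cs := x.toList
  let numDict := cs.foldl pvBump PySem.Dict.empty
  let res := cs.foldl (pvStepA cs numDict (cs.headD ' ')) (PySem.Dict.empty, [])
  String.ofList res.2

-- ===== PORT B =====
def pvPartB (cs : List Char) (h0 : Char) (p : Char × Int) : List Char :=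
  let s := if 1 < p.2 then ['s'] else []
  if p.1 = h0 then
    ['"'] ++ cs ++ "\" has ".toList ++ PySem.Int.toChars p.2 ++ " \"".toList ++ [p.1] ++ ['"'] ++ s
  else
    ", ".toList ++ PySem.Int.toChars p.2 ++ " \"".toList ++ [p.1] ++ ['"'] ++ s

def count_alt (x : String) : String :=
  let cs := x.toList
  if cs.isEmpty then "" else
  let counts := cs.foldl (fun d c => d.insert c (d.getD c 0 + 1)) PySem.Dict.empty
  String.ofList (counts.items.map (pvPartB cs (cs.headD ' '))).flatten

-- ===== PRECONDITION & SPEC =====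
def Spec_count (x : String) (out : String) : Prop := out = count_alt x
instance (x : String) (out : String) : Decidable (Spec_count x out) := by unfold Spec_count; infer_instance

-- ===== CLAIM (what is proved, stated in full; the proofs are below) =====
def Claim_equal_count : Prop := ∀ (x : String), Dom_count x → Spec_count x (count x)

-- ===== LEMMAS AND PROOFS =====

-- the non-header fragment A appends for a character c (count taken in the whole string cs)
def pvItem (cs : List Char) (c : Char) : List Char :=
  ", ".toList ++ PySem.Int.toChars (cs.count c : Int) ++ " \"".toList ++ [c]
    ++ (if 1 < (cs.count c : Int) then "\"s".toList else "\"".toList)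

-- the characters A's second loop emits a fragment for, in order, given the "already said" dict
def pvFresh (cs : List Char) : PySem.Dict Char Int → List Char → List Char
  | _, [] => []
  | said, c :: r =>
    if 1 < (cs.count c : Int) then
      if said.contains c then pvFresh cs said r
      else c :: pvFresh cs (pvBump said c) r
    else c :: pvFresh cs said r

lemma pvBump_eq (d : PySem.Dict Char Int) (c : Char) :
    pvBump d c = d.insert c (d.getD c 0 + 1) := by
  unfold pvBump
  cases h : d.get? c <;>
    simp [PySem.Dict.getD_eq_get?_getD, h]

lemma numDict_eq (cs : List Char) :
    cs.foldl pvBump PySem.Dict.empty = PySem.Dict.counter cs := by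
  have h : (pvBump : PySem.Dict Char Int → Char → PySem.Dict Char Int)
      = fun d c => d.insert c (d.getD c 0 + 1) := by
    funext d c; exact pvBump_eq d c
  rw [h, PySem.Dict.foldl_insert_getD_add_one_eq_counter]

lemma contains_pvBump (d : PySem.Dict Char Int) (c c' : Char) :
    (pvBump d c).contains c' = (c' == c || d.contains c') := by
  rw [pvBump_eq]; exact PySem.Dict.contains_insert d c c' _

lemma loopA_eq (cs : List Char) (h0 : Char)
    (r : List Char) (said : PySem.Dict Char Int) (acc : List Char)
    (hh0 : h0 ∈ r → said.contains h0 = true ∧ 1 < cs.count h0) :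
    (r.foldl (pvStepA cs (PySem.Dict.counter cs) h0) (said, acc)).2
      = acc ++ ((pvFresh cs said r).map (pvItem cs)).flatten := by
  induction r generalizing said acc with
  | nil => simp [pvFresh]
  | cons c r ih =>
    rw [List.foldl_cons]
    by_cases hc : c = h0
    · subst hc
      obtain ⟨hcont, hgt⟩ := hh0 (List.mem_cons_self ..)
      have hgtI : 1 < ((cs.count c : Int)) := by exact_mod_cast hgt
      have hA : pvStepA cs (PySem.Dict.counter cs) c (said, acc) c = (said, acc) := by
        rw [pvStepA, if_pos rfl, if_neg (by rw [hcont]; rintro ⟨-, h⟩; cases h),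
          if_neg (by rw [PySem.Dict.getD_counter]; omega)]
      rw [hA, pvFresh, if_pos hgtI, if_pos hcont]
      exact ih said acc (fun _ => ⟨hcont, hgt⟩)
    · have hh0' : ∀ said' : PySem.Dict Char Int, said'.contains h0 = said.contains h0 →
          h0 ∈ r → said'.contains h0 = true ∧ 1 < cs.count h0 := by
        intro said' he hm
        obtain ⟨h1, h2⟩ := hh0 (List.mem_cons_of_mem _ hm)
        exact ⟨he.trans h1, h2⟩
      by_cases hgt : 1 < ((cs.count c : Int))
      · have hgtN : 1 < cs.count c := by exact_mod_cast hgt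
        by_cases hs : said.contains c
        · have hA : pvStepA cs (PySem.Dict.counter cs) h0 (said, acc) c = (said, acc) := by
            rw [pvStepA, if_neg hc, if_neg (by rw [hs]; rintro ⟨-, h⟩; cases h),
              if_neg (by rw [PySem.Dict.getD_counter]; omega)]
          rw [hA, pvFresh, if_pos hgt, if_pos hs]
          exact ih said acc (hh0' said rfl)
        · simp only [Bool.not_eq_true] at hs
          rw [pvStepA, if_neg hc,
            if_pos ⟨by rw [PySem.Dict.getD_counter]; exact hgt, hs⟩]
          rw [pvFresh, if_pos hgt, if_neg (by simp [hs])]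
          rw [ih (pvBump said c) _ (hh0' _ (by rw [contains_pvBump]; simp [Ne.symm hc]))]
          simp [pvItem, PySem.Dict.getD_counter, hgtN, List.append_assoc]
      · have hgtN : ¬ 1 < cs.count c := by exact_mod_cast hgt
        rw [pvStepA, if_neg hc, if_neg (by rintro ⟨h1, -⟩; rw [PySem.Dict.getD_counter] at h1; exact hgt h1),
          if_pos (by rw [PySem.Dict.getD_counter]; omega)]
        rw [pvFresh, if_neg hgt]
        rw [ih said _ (hh0' said rfl)]
        simp [pvItem, PySem.Dict.getD_counter, hgtN, List.append_assoc]

lemma pv_filter_discard {said : PySem.Dict Char Int} {c : Char} (hc : said.contains c = true)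
    (l : List Char) :
    (PySem.Set.discard l c).filter (fun y => !said.contains y)
      = l.filter (fun y => !said.contains y) := by
  unfold PySem.Set.discard
  rw [List.filter_filter]
  refine List.filter_congr ?_
  intro x hx
  by_cases hxc : x = c
  · subst hxc; simp [hc]
  · simp [hxc]

lemma pv_filter_bump (said : PySem.Dict Char Int) (c : Char) (l : List Char) :
    l.filter (fun y => !(pvBump said c).contains y)
      = (PySem.Set.discard l c).filter (fun y => !said.contains y) := by
  unfold PySem.Set.discard
  rw [List.filter_filter]
  refine List.filter_congr ?_
  intro x hx
  rw [contains_pvBump]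
  cases hxc : x == c <;> cases hsx : said.contains x <;> simp_all

lemma fresh_eq (cs : List Char) (r : List Char) (said : PySem.Dict Char Int)
    (h : ∀ c ∈ r, cs.count c ≤ 1 → r.count c ≤ 1 ∧ said.contains c = false) :
    pvFresh cs said r = (PySem.Set.ofList r).filter (fun c => !said.contains c) := by
  induction r generalizing said with
  | nil => simp [pvFresh]
  | cons c r ih =>
    have hcount : ∀ said' : PySem.Dict Char Int,
        (∀ c' ∈ r, cs.count c' ≤ 1 → said'.contains c' = false) →
        (∀ c' ∈ r, cs.count c' ≤ 1 → r.count c' ≤ 1 ∧ said'.contains c' = false) := by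
      intro said' hs c' hm hle
      obtain ⟨h1, -⟩ := h c' (List.mem_cons_of_mem _ hm) hle
      refine ⟨le_trans ?_ h1, hs c' hm hle⟩
      rw [List.count_cons]
      split <;> omega
    rw [pvFresh, PySem.Set.ofList_cons, List.filter_cons]
    by_cases hgt : 1 < ((cs.count c : Int))
    · have hgtN : 1 < cs.count c := by exact_mod_cast hgt
      by_cases hs : said.contains c
      · rw [if_pos hgt, if_pos hs,
          ih said (hcount said (fun c' hm hle => (h c' (List.mem_cons_of_mem _ hm) hle).2)),
          pv_filter_discard hs]
        simp [hs]
      · simp only [Bool.not_eq_true] at hs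
        rw [if_pos hgt, if_neg (by simp [hs])]
        rw [ih (pvBump said c) (hcount _ (by
          intro c' hm hle
          rw [contains_pvBump]
          have : ¬ c' = c := fun he => by subst he; omega
          simp [this, (h c' (List.mem_cons_of_mem _ hm) hle).2]))]
        rw [pv_filter_bump]
        simp [hs]
    · have hle : cs.count c ≤ 1 := by
        have := Int.not_lt.mp hgt; exact_mod_cast this
      obtain ⟨h1, h2⟩ := h c (List.mem_cons_self ..) hle
      have hnr : c ∉ r := by
        rw [← List.count_eq_zero]
        rw [List.count_cons] at h1
        simp at h1; omega
      have hdis : PySem.Set.discard (PySem.Set.ofList r) c = PySem.Set.ofList r := by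
        unfold PySem.Set.discard
        refine List.filter_eq_self.mpr ?_
        intro x hx
        have : x ∈ r := (PySem.Set.mem_ofList ..).mp hx
        simp; rintro rfl; exact hnr this
      rw [if_neg hgt, if_pos (by simp [h2]),
        ih said (hcount said (fun c' hm hle' => (h c' (List.mem_cons_of_mem _ hm) hle').2)), hdis]

lemma map_item_eq (cs : List Char) (h0 : Char) (l : List Char) (hl : ∀ k ∈ l, k ≠ h0) :
    l.map (pvPartB cs h0 ∘ fun k => (k, (cs.count k : Int))) = l.map (pvItem cs) := by
  refine List.map_congr_left ?_
  intro k hk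
  have hne : ¬ k = h0 := hl k hk
  by_cases hgt : 1 < ((cs.count k : Int)) <;>
    simp [pvPartB, pvItem, hne, hgt, List.append_assoc]

-- ===== VERDICT (by name: the statement is the Claim_ definition above) =====
theorem count_spec : Claim_equal_count := by
  intro x _
  unfold Spec_count count count_alt
  cases hcs : x.toList with
  | nil => simp
  | cons h0 rest =>
    simp only [numDict_eq, List.isEmpty_cons, List.headD_cons, if_neg (by simp : ¬ (false = true))]
    rw [PySem.Dict.foldl_insert_getD_add_one_eq_counter, PySem.Dict.items_counter,
      PySem.Set.ofList_cons, List.map_cons, List.map_cons, List.flatten_cons, List.map_map,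
      List.foldl_cons]
    by_cases hgt : 1 < (((h0 :: rest).count h0 : Int))
    · have hgtN : 1 < (h0 :: rest).count h0 := by exact_mod_cast hgt
      rw [show pvStepA (h0 :: rest) (PySem.Dict.counter (h0 :: rest)) h0 (PySem.Dict.empty, []) h0
          = (pvBump PySem.Dict.empty h0,
             ['"'] ++ (h0 :: rest) ++ "\" has ".toList
               ++ PySem.Int.toChars ((PySem.Dict.counter (h0 :: rest)).getD h0 0)
               ++ " \"".toList ++ [h0] ++ "\"s".toList) from by
        rw [pvStepA, if_pos rfl,
          if_pos ⟨by rw [PySem.Dict.getD_counter]; exact hgt, by simp [PySem.Dict.contains_empty]⟩]]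
      rw [loopA_eq _ _ _ _ _ (fun hm => ⟨by rw [contains_pvBump]; simp, hgtN⟩)]
      rw [fresh_eq _ _ _ (by
        intro c hm hle
        have hne : ¬ c = h0 := by
          rintro rfl
          have : 1 ≤ rest.count c := List.count_pos_iff.mpr hm
          rw [List.count_cons_self] at hle; omega
        constructor
        · have : rest.count c ≤ (h0 :: rest).count c := by rw [List.count_cons]; split <;> omega
          omega
        · rw [contains_pvBump]; simp [hne, PySem.Dict.contains_empty])]
      have hpred : (fun y => !(pvBump PySem.Dict.empty h0).contains y)
          = fun y => !(y == h0) := by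
        funext y; rw [contains_pvBump]; simp [PySem.Dict.contains_empty]
      rw [hpred]
      rw [map_item_eq (h0 :: rest) h0 _ (by
        intro k hk
        have := List.of_mem_filter hk
        simpa using this)]
      have hfil : (PySem.Set.ofList rest).filter (fun y => !(y == h0))
          = PySem.Set.discard (PySem.Set.ofList rest) h0 := rfl
      rw [hfil]
      have hmem : h0 ∈ rest := by
        rw [List.count_cons_self] at hgtN
        exact List.count_pos_iff.mp (by omega)
      simp [pvPartB, PySem.Dict.getD_counter, hmem, List.append_assoc]
    · have hle : (h0 :: rest).count h0 ≤ 1 := by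
        have := Int.not_lt.mp hgt; exact_mod_cast this
      have hnr : h0 ∉ rest := by
        rw [List.count_cons_self] at hle
        rw [← List.count_eq_zero]; omega
      rw [show pvStepA (h0 :: rest) (PySem.Dict.counter (h0 :: rest)) h0 (PySem.Dict.empty, []) h0
          = (PySem.Dict.empty,
             ['"'] ++ (h0 :: rest) ++ "\" has ".toList
               ++ PySem.Int.toChars ((PySem.Dict.counter (h0 :: rest)).getD h0 0)
               ++ " \"".toList ++ [h0] ++ "\"".toList) from by
        rw [pvStepA, if_pos rfl,
          if_neg (by rintro ⟨h1, -⟩; rw [PySem.Dict.getD_counter] at h1; exact hgt h1),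
          if_pos (by rw [PySem.Dict.getD_counter]; exact_mod_cast hle)]]
      rw [loopA_eq _ _ _ _ _ (fun hm => absurd hm hnr)]
      rw [fresh_eq _ _ _ (by
        intro c hm hle'
        refine ⟨?_, by simp [PySem.Dict.contains_empty]⟩
        have : rest.count c ≤ (h0 :: rest).count c := by rw [List.count_cons]; split <;> omega
        omega)]
      have hdis : PySem.Set.discard (PySem.Set.ofList rest) h0 = PySem.Set.ofList rest := by
        unfold PySem.Set.discard
        refine List.filter_eq_self.mpr ?_
        intro y hy
        have : y ∈ rest := (PySem.Set.mem_ofList ..).mp hy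
        simp; rintro rfl; exact hnr this
      rw [hdis]
      rw [show (PySem.Set.ofList rest).filter (fun y => !PySem.Dict.empty.contains y)
          = PySem.Set.ofList rest from List.filter_eq_self.mpr
            (by intro y hy; simp [PySem.Dict.contains_empty])]
      rw [map_item_eq (h0 :: rest) h0 _ (by
        intro k hk
        have : k ∈ rest := (PySem.Set.mem_ofList ..).mp hk
        rintro rfl; exact hnr this)]
      simp [pvPartB, PySem.Dict.getD_counter, hnr, List.append_assoc]
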